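-- pv_equiv track=rewrite | github.com/its-Raz/NLP_HW1 | test.py | is_numeric_with_or_without_signs
-- ===== SOURCE A (Python) =====
-- def is_numeric_with_or_without_signs(word):
--     # signs without ' - ' beacuse we did a pre check on it.
--     template = ""
--     current_is_digit = False
--     for char in word:
--         if char.isdigit() == False:
--             current_is_digit = False
--             template += char
--         else:
--             if (current_is_digit == False):
--                 template += 'digits'
--                 current_is_digit = True
--
--     return template
-- ===== SOURCE B (Python) =====
-- def is_numeric_with_or_without_signs(word):
--     # Run-based rewrite: scan maximal runs of same-kind chars, emit 'digits' per digit run.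
--     pieces = []
--     i = 0
--     n = len(word)
--     while i < n:
--         d = word[i].isdigit()
--         j = i
--         while j < n and word[j].isdigit() == d:
--             j += 1
--         pieces.append('digits' if d else word[i:j])
--         i = j
--     return ''.join(pieces)
-- ===== Notes on version B (the rewrite author's own statement) =====
-- stated objective: idiomatic
-- what changed: Replaced A's single-pass boolean-flag state machine over characters by a run-based scan: split the string into maximal runs of same-isdigit-kind characters and emit the placeholder for a digit run, the run verbatim otherwise.
import Mathlib
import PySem

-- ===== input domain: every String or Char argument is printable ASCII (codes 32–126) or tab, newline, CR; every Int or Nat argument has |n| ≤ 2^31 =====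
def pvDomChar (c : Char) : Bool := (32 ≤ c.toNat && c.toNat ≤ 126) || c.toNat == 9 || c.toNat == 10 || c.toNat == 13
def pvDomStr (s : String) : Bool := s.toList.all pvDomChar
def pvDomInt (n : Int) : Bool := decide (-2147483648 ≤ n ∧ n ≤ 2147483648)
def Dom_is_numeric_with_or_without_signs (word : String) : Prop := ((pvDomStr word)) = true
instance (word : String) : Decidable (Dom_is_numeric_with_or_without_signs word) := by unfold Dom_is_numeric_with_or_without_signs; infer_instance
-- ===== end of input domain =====

-- B replaces A's char-by-char flag machine by a scan over maximal same-kind runs (idiomatic, same cost).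

-- ===== PORT A =====
-- Literal transliteration of A: fold over the characters with state (template, current_is_digit).
def is_numeric_with_or_without_signs (word : String) : String :=
  let st := word.toList.foldl
    (fun (st : List Char × Bool) char =>
      if PySem.Chars.isdigit char == false then (st.1 ++ [char], false)
      else if st.2 == false then (st.1 ++ "digits".toList, true) else st)
    ([], false)
  String.ofList st.1

-- ===== PORT B =====
-- B's outer while loop: take the maximal run of characters with the same isdigit-kind
-- as the head, emit its piece, continue on the rest (takeWhile/dropWhile = Source B's inner j-scan).
def pvRuns : List Char → List Char
  | [] => []
  | c :: rest =>
      (if PySem.Chars.isdigit c then "digits".toList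
       else List.takeWhile (fun x => PySem.Chars.isdigit x == PySem.Chars.isdigit c) (c :: rest))
      ++ pvRuns (List.dropWhile (fun x => PySem.Chars.isdigit x == PySem.Chars.isdigit c) (c :: rest))
termination_by cs => cs.length
decreasing_by
  simp only [List.dropWhile]
  simp only [beq_self_eq_true]
  exact Nat.lt_succ_of_le (List.length_dropWhile_le _ _)

def is_numeric_with_or_without_signs_alt (word : String) : String :=
  String.ofList (pvRuns word.toList)

-- ===== PRECONDITION & SPEC =====
def Spec_is_numeric_with_or_without_signs (word : String) (out : String) : Prop := out = is_numeric_with_or_without_signs_alt word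
instance (word : String) (out : String) : Decidable (Spec_is_numeric_with_or_without_signs word out) := by unfold Spec_is_numeric_with_or_without_signs; infer_instance

-- ===== CLAIM (what is proved, stated in full; the proofs are below) =====
def Claim_equal_is_numeric_with_or_without_signs : Prop := ∀ (word : String), Dom_is_numeric_with_or_without_signs word → Spec_is_numeric_with_or_without_signs word (is_numeric_with_or_without_signs word)

-- ===== LEMMAS AND PROOFS =====

-- A's loop, written as structural recursion on the remaining input (no accumulator).
def pvLoopA : List Char → Bool → List Char
  | [], _ => []
  | c :: cs, cur =>
      if PySem.Chars.isdigit c == false then c :: pvLoopA cs false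
      else if cur == false then "digits".toList ++ pvLoopA cs true
      else pvLoopA cs cur

theorem pvFoldl_eq_loopA (cs : List Char) (acc : List Char) (cur : Bool) :
    (cs.foldl
      (fun (st : List Char × Bool) char =>
        if PySem.Chars.isdigit char == false then (st.1 ++ [char], false)
        else if st.2 == false then (st.1 ++ "digits".toList, true) else st)
      (acc, cur)).1 = acc ++ pvLoopA cs cur := by
  induction cs generalizing acc cur with
  | nil => simp [pvLoopA]
  | cons c cs ih =>
    simp only [List.foldl_cons, pvLoopA]
    by_cases hd : PySem.Chars.isdigit c = false
    · simpa [hd] using ih (acc ++ [c]) false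
    · simp only [Bool.not_eq_false] at hd
      by_cases hc : cur = false
      · subst hc
        simpa [hd] using ih (acc ++ "digits".toList) true
      · simp only [Bool.not_eq_false] at hc
        subst hc
        simpa [hd] using ih acc true

theorem pvLoopA_nondigit_prefix (cs rest : List Char)
    (h : ∀ c ∈ cs, PySem.Chars.isdigit c = false) :
    pvLoopA (cs ++ rest) false = cs ++ pvLoopA rest false := by
  induction cs with
  | nil => simp
  | cons c cs ih =>
    have hc : PySem.Chars.isdigit c = false := h c (List.mem_cons_self ..)
    simp only [List.cons_append, pvLoopA, hc]
    simp [ih (fun x hx => h x (List.mem_cons_of_mem _ hx))]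

theorem pvLoopA_true_of_head_nondigit (rest : List Char)
    (h : ∀ c ∈ rest.head?, PySem.Chars.isdigit c = false) :
    pvLoopA rest true = pvLoopA rest false := by
  cases rest with
  | nil => rfl
  | cons c cs =>
    have hc : PySem.Chars.isdigit c = false := h c (by simp)
    simp [pvLoopA, hc]

theorem pvLoopA_digit_keep (cs rest : List Char)
    (h : ∀ c ∈ cs, PySem.Chars.isdigit c = true) :
    pvLoopA (cs ++ rest) true = pvLoopA rest true := by
  induction cs with
  | nil => simp
  | cons c cs ih =>
    have hc := h c (List.mem_cons_self ..)
    simp only [List.cons_append, pvLoopA, hc]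
    simp [ih (fun x hx => h x (List.mem_cons_of_mem _ hx))]

theorem pvLoopA_digit_prefix (cs rest : List Char) (hne : cs ≠ [])
    (h : ∀ c ∈ cs, PySem.Chars.isdigit c = true) :
    pvLoopA (cs ++ rest) false = "digits".toList ++ pvLoopA rest true := by
  cases cs with
  | nil => exact absurd rfl hne
  | cons c cs =>
    have hc := h c (List.mem_cons_self ..)
    simp only [List.cons_append, pvLoopA, hc]
    simp [pvLoopA_digit_keep cs rest (fun x hx => h x (List.mem_cons_of_mem _ hx))]

theorem pvHead_dropWhile_false {p : Char → Bool} (l : List Char) :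
    ∀ c ∈ (l.dropWhile p).head?, p c = false := by
  induction l with
  | nil => simp
  | cons a l ih =>
    by_cases ha : p a
    · simpa [List.dropWhile, ha] using ih
    · simp only [Bool.not_eq_true] at ha
      simp [List.dropWhile, ha]

theorem pvLoopA_eq_pvRuns (cs : List Char) : pvLoopA cs false = pvRuns cs := by
  induction hn : cs.length using Nat.strong_induction_on generalizing cs with
  | _ n ih =>
  cases cs with
  | nil => simp [pvLoopA, pvRuns]
  | cons c rest =>
    set p : Char → Bool := fun x => PySem.Chars.isdigit x == PySem.Chars.isdigit c with hp
    have hsplit : (c :: rest).takeWhile p ++ (c :: rest).dropWhile p = c :: rest :=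
      List.takeWhile_append_dropWhile
    have hlt : ((c :: rest).dropWhile p).length < n := by
      subst hn
      have : (c :: rest).dropWhile p = rest.dropWhile p := by
        simp [List.dropWhile, hp]
      rw [this]
      exact Nat.lt_succ_of_le (List.length_dropWhile_le _ _)
    have htail := ih _ hlt ((c :: rest).dropWhile p) rfl
    have hhead : ∀ x ∈ ((c :: rest).dropWhile p).head?, p x = false :=
      pvHead_dropWhile_false _
    by_cases hd : PySem.Chars.isdigit c = true
    · have hall : ∀ x ∈ (c :: rest).takeWhile p, PySem.Chars.isdigit x = true := by
        intro x hx
        have := List.mem_takeWhile_imp hx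
        simp only [hp, beq_iff_eq, hd] at this
        exact this
      have hne : (c :: rest).takeWhile p ≠ [] := by
        simp [List.takeWhile, hp]
      calc pvLoopA (c :: rest) false
          = pvLoopA ((c :: rest).takeWhile p ++ (c :: rest).dropWhile p) false := by rw [hsplit]
        _ = "digits".toList ++ pvLoopA ((c :: rest).dropWhile p) true :=
            pvLoopA_digit_prefix _ _ hne hall
        _ = "digits".toList ++ pvLoopA ((c :: rest).dropWhile p) false := by
            rw [pvLoopA_true_of_head_nondigit _ (by
              intro x hx
              have := hhead x hx
              simp only [hp, beq_eq_false_iff_ne, ne_eq, hd] at this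
              simpa using this)]
        _ = "digits".toList ++ pvRuns ((c :: rest).dropWhile p) := by rw [htail]
        _ = pvRuns (c :: rest) := by rw [pvRuns]; simp [hd, hp]
    · simp only [Bool.not_eq_true] at hd
      have hall : ∀ x ∈ (c :: rest).takeWhile p, PySem.Chars.isdigit x = false := by
        intro x hx
        have := List.mem_takeWhile_imp hx
        simp only [hp, beq_iff_eq, hd] at this
        exact this
      calc pvLoopA (c :: rest) false
          = pvLoopA ((c :: rest).takeWhile p ++ (c :: rest).dropWhile p) false := by rw [hsplit]
        _ = (c :: rest).takeWhile p ++ pvLoopA ((c :: rest).dropWhile p) false :=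
            pvLoopA_nondigit_prefix _ _ hall
        _ = (c :: rest).takeWhile p ++ pvRuns ((c :: rest).dropWhile p) := by rw [htail]
        _ = pvRuns (c :: rest) := by rw [pvRuns]; simp [hd, hp]

-- ===== VERDICT (by name: the statement is the Claim_ definition above) =====
theorem is_numeric_with_or_without_signs_spec : Claim_equal_is_numeric_with_or_without_signs := by
  intro word _
  unfold Spec_is_numeric_with_or_without_signs
  show String.ofList (word.toList.foldl
      (fun (st : List Char × Bool) char =>
        if PySem.Chars.isdigit char == false then (st.1 ++ [char], false)
        else if st.2 == false then (st.1 ++ "digits".toList, true) else st)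
      ([], false)).1 = is_numeric_with_or_without_signs_alt word
  rw [pvFoldl_eq_loopA, pvLoopA_eq_pvRuns]
  rfl
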